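-- pv_equiv track=rewrite | github.com/TrellixVulnTeam/Machine-Learning-BSUIR-_UFAK | lab11/lab11.py | convert_into_features_vector
-- ===== SOURCE A (Python) =====
-- def convert_into_features_vector(chall):
--     phi = []
--     for i in range(1, len(chall)):
--         s = sum(chall[i:])
--         if s % 2 == 0:
--             phi.append(1)
--         else:
--             phi.append(-1)
--     phi.append(1)
--     return phi
-- ===== SOURCE B (Python) =====
-- def convert_into_features_vector(chall):
--     out = [1]
--     s = 0
--     for x in reversed(chall[1:]):
--         s += x
--         out.append(1 if s % 2 == 0 else -1)
--     out.reverse()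
--     return out
-- ===== Notes on version B (the rewrite author's own statement) =====
-- stated objective: faster
-- what changed: Replaces the per-index recomputation of each suffix sum (sum(chall[i:]) inside the loop) by one backward pass that maintains the running suffix sum and emits parities back-to-front, reversing once at the end.
import Mathlib
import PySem

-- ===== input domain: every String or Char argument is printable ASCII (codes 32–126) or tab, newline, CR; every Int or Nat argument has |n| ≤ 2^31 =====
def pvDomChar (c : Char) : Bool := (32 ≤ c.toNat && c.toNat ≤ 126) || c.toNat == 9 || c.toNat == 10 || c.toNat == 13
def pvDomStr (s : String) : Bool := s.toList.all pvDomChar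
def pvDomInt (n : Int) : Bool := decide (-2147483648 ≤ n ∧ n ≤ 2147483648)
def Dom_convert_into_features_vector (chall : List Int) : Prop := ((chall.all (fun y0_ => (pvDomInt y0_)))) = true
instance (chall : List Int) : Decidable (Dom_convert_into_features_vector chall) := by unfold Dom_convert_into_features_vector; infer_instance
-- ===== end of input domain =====

-- B replaces A's per-index suffix-sum recomputation by a single backward pass
-- maintaining the running suffix sum (O(n^2) -> O(n)).


-- ===== PORT A =====
def convert_into_features_vector (chall : List Int) : List Int :=
  let phi : List Int := (PySem.List.pyRange 1 (chall.length : Int) 1).foldl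
    (fun phi i =>
      let s := (PySem.List.slice chall (some i) none).sum
      if PySem.Int.mod s 2 = 0 then phi ++ [1] else phi ++ [-1]) []
  phi ++ [1]

-- ===== PORT B =====
def convert_into_features_vector_alt (chall : List Int) : List Int :=
  let st := ((PySem.List.slice chall (some 1) none).reverse).foldl
    (fun (st : List Int × Int) x =>
      let s := st.2 + x
      (st.1 ++ [if PySem.Int.mod s 2 = 0 then (1 : Int) else -1], s)) ([1], 0)
  st.1.reverse

-- ===== PRECONDITION & SPEC =====
def Spec_convert_into_features_vector (chall : List Int) (out : List Int) : Prop := out = convert_into_features_vector_alt chall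
instance (chall : List Int) (out : List Int) : Decidable (Spec_convert_into_features_vector chall out) := by unfold Spec_convert_into_features_vector; infer_instance

-- ===== CLAIM (what is proved, stated in full; the proofs are below) =====
def Claim_equal_convert_into_features_vector : Prop := ∀ (chall : List Int), Dom_convert_into_features_vector chall → Spec_convert_into_features_vector chall (convert_into_features_vector chall)

-- ===== LEMMAS AND PROOFS =====
def pvPar (s : Int) : Int := if PySem.Int.mod s 2 = 0 then 1 else -1

def pvRefS (s0 : Int) : List Int → List Int
  | [] => []
  | x :: xs => pvPar (s0 + (x + xs.sum)) :: pvRefS s0 xs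

theorem pv_lemA (t : List Int) :
    (List.range t.length).map (fun k => pvPar ((t.drop k).sum)) = pvRefS 0 t := by
  induction t with
  | nil => simp [pvRefS]
  | cons x xs ih =>
    rw [List.length_cons, List.range_succ_eq_map]
    simp only [List.map_cons, List.map_map, List.drop_zero]
    rw [pvRefS]
    have h1 : (x :: xs).sum = 0 + (x + xs.sum) := by rw [List.sum_cons]; ring
    rw [h1]
    congr 1

theorem pv_lemB (t : List Int) (acc : List Int) (s0 : Int) :
    t.reverse.foldl
      (fun (st : List Int × Int) x =>
        let s := st.2 + x
        (st.1 ++ [if PySem.Int.mod s 2 = 0 then (1 : Int) else -1], s)) (acc, s0)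
      = (acc ++ (pvRefS s0 t).reverse, s0 + t.sum) := by
  induction t generalizing acc s0 with
  | nil => simp [pvRefS]
  | cons x xs ih =>
    rw [List.reverse_cons, List.foldl_append, ih]
    simp only [List.foldl_cons, List.foldl_nil, pvRefS, pvPar, List.reverse_cons]
    have h1 : s0 + xs.sum + x = s0 + (x + xs.sum) := by ring
    rw [List.append_assoc, h1, List.sum_cons]

theorem pv_fold_eq (chall : List Int) (l : List Int) (init : List Int) :
    l.foldl (fun phi i =>
      let s := (PySem.List.slice chall (some i) none).sum
      if PySem.Int.mod s 2 = 0 then phi ++ [1] else phi ++ [-1]) init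
    = init ++ l.map (fun i => pvPar ((PySem.List.slice chall (some i) none).sum)) := by
  have h : (fun (phi : List Int) (i : Int) =>
      let s := (PySem.List.slice chall (some i) none).sum
      if PySem.Int.mod s 2 = 0 then phi ++ [1] else phi ++ [-1])
    = fun phi i => phi ++ [pvPar ((PySem.List.slice chall (some i) none).sum)] := by
    funext phi i
    simp only [pvPar]
    split <;> rfl
  rw [h, PySem.List.foldl_append_singleton_eq_map]

-- ===== VERDICT (by name: the statement is the Claim_ definition above) =====
theorem convert_into_features_vector_spec : Claim_equal_convert_into_features_vector := by
  intro chall _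
  unfold Spec_convert_into_features_vector convert_into_features_vector convert_into_features_vector_alt
  cases chall with
  | nil => decide
  | cons c t =>
    simp only
    rw [PySem.List.slice_from_one, List.tail_cons, pv_lemB]
    rw [pv_fold_eq, PySem.List.pyRange_one, List.map_map]
    have hlen : (((c :: t).length : Int) - 1).toNat = t.length := by simp
    rw [hlen]
    simp only [List.nil_append, List.reverse_append, List.reverse_reverse, List.reverse_cons,
      List.reverse_nil, List.nil_append]
    congr 1
    rw [← pv_lemA]
    apply List.map_congr_left
    intro k _
    simp only [Function.comp]
    have h2 : (1 + (k : Int)) = ((1 + k : Nat) : Int) := by push_cast; ring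
    rw [h2, PySem.List.slice_from_natCast, Nat.add_comm, List.drop_succ_cons]
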